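-- pv_equiv track=rewrite | github.com/JamshaidMushtaqq/calculating_price_for_parking- | week2.py | validate_frequent_parking_number
-- ===== SOURCE A (Python) =====
-- def validate_frequent_parking_number(number):
--     if len(number) != 5:
--         return False
--
--     digits = number[:-1]
--     check_digit = number[-1]
--
--     if not digits.isdigit() or not check_digit.isdigit():
--         return False
--
--     total = sum(int(digit) * (10 - index) for index, digit in enumerate(digits))
--     remainder = total % 11
--     if remainder == 0:
--         calculated_check_digit = 0
--     else:
--         calculated_check_digit = 11 - remainder
--
--     return str(calculated_check_digit) == check_digit
-- ===== SOURCE B (Python) =====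
-- def validate_frequent_parking_number(number):
--     if len(number) != 5 or not number.isdigit():
--         return False
--     # Double-accumulator (prefix-sum) scheme: after the loop over the first
--     # four digits, s = d0+d1+d2+d3 and t = 4*d0+3*d1+2*d2+d3, so
--     # t + 6*s = 10*d0+9*d1+8*d2+7*d3 -- no per-digit multiplication needed.
--     s = t = 0
--     for ch in number[:4]:
--         s += int(ch)
--         t += s
--     return (t + 6 * s + int(number[4])) % 11 == 0
-- ===== Notes on version B (the rewrite author's own statement) =====
-- stated objective: alternative
-- what changed: B validates with a multiplication-free double-accumulator (prefix-sum) loop: two running sums s,t over the first four digits give the weighted total as t + 6*s, and validity becomes one divisibility test (t + 6*s + last digit) % 11 == 0, replacing A's enumerate-with-weights comprehension, check-digit reconstruction and stringify-and-compare.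
import Mathlib
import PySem

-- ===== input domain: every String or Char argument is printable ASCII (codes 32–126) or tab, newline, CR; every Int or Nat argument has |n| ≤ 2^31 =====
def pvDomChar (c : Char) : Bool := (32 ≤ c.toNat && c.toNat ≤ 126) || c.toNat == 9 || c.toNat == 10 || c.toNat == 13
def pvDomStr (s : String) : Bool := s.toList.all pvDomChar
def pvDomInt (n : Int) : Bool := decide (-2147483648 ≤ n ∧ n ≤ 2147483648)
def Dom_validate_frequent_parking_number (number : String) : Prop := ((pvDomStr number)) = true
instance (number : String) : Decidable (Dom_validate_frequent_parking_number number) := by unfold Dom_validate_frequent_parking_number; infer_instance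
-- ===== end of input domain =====

-- B replaces A's weighted comprehension + check-digit reconstruction + stringify-and-compare by a
-- multiplication-free double-accumulator (prefix-sum) loop and one mod-11 divisibility test (objective: alternative).

-- ===== PORT A =====
-- int(digit) on a single char that passed isdigit: ofChars? is some there, so .getD 0 is exact on Dom
def validate_frequent_parking_number (number : String) : Bool :=
  if PySem.Str.len number ≠ 5 then false
  else
    let digits := PySem.List.slice number.toList none (some (-1))
    let check_digit := PySem.List.pyGetD number.toList (-1) ' '   -- in range: len = 5
    if ¬ PySem.Chars.strIsdigit digits ∨ ¬ PySem.Chars.strIsdigit [check_digit] then false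
    else
      let total := ((PySem.List.enumerate digits 0).map
        (fun p => (PySem.Int.ofChars? [p.2]).getD 0 * (10 - p.1))).sum
      let remainder := PySem.Int.mod total 11
      let calculated_check_digit := if remainder = 0 then (0 : Int) else 11 - remainder
      decide (PySem.Int.toChars calculated_check_digit = [check_digit])

-- ===== PORT B =====
def validate_frequent_parking_number_alt (number : String) : Bool :=
  if PySem.Str.len number ≠ 5 ∨ ¬ PySem.Str.strIsdigit number then false
  else
    let st := (PySem.List.slice number.toList none (some 4)).foldl
      (fun (p : Int × Int) ch =>
        (p.1 + (PySem.Int.ofChars? [ch]).getD 0,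
         p.2 + (p.1 + (PySem.Int.ofChars? [ch]).getD 0))) (0, 0)
    decide (PySem.Int.mod (st.2 + 6 * st.1 + (PySem.Int.ofChars? [PySem.List.pyGetD number.toList 4 ' ']).getD 0) 11 = 0)

-- ===== PRECONDITION & SPEC =====
def Spec_validate_frequent_parking_number (number : String) (out : Bool) : Prop := out = validate_frequent_parking_number_alt number
instance (number : String) (out : Bool) : Decidable (Spec_validate_frequent_parking_number number out) := by unfold Spec_validate_frequent_parking_number; infer_instance

-- ===== CLAIM =====
def Claim_equal_validate_frequent_parking_number : Prop := ∀ (number : String), Dom_validate_frequent_parking_number number → Spec_validate_frequent_parking_number number (validate_frequent_parking_number number)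

-- ===== LEMMAS AND PROOFS =====

theorem digit_enum (c : Char) (h : PySem.Chars.isdigit c = true) :
    c ∈ ['0','1','2','3','4','5','6','7','8','9'] := by
  simp only [PySem.Chars.isdigit, Bool.and_eq_true, decide_eq_true_eq] at h
  have hv : 48 ≤ c.toNat ∧ c.toNat ≤ 57 := ⟨h.1, h.2⟩
  have hc := Char.ofNat_toNat c
  obtain ⟨n, hn⟩ : ∃ n, c.toNat = n := ⟨_, rfl⟩
  rw [hn] at hv hc
  obtain ⟨hv1, hv2⟩ := hv
  interval_cases n <;> rw [← hc] <;> decide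

-- core arithmetic: comparing against the computed check digit is the mod-11 divisibility test
theorem key_one (T dv : Int) (L : List Char) (h0 : 0 ≤ dv) (h9 : dv ≤ 9)
    (htc : ∀ c : Int, 0 ≤ c → c ≤ 10 → (PySem.Int.toChars c = L ↔ c = dv)) :
    decide (PySem.Int.toChars (if PySem.Int.mod T 11 = 0 then (0:Int) else 11 - PySem.Int.mod T 11) = L)
    = decide (PySem.Int.mod (T + dv) 11 = 0) := by
  rw [decide_eq_decide]
  simp only [PySem.Int.mod_eq_emod_of_pos (show (0:Int) < 11 by norm_num)]
  have hr1 := Int.emod_nonneg T (show (11:Int) ≠ 0 by norm_num)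
  have hr2 := Int.emod_lt_of_pos T (show (0:Int) < 11 by norm_num)
  rw [htc _ (by split_ifs <;> omega) (by split_ifs <;> omega)]
  constructor
  · intro h; split_ifs at h <;> omega
  · intro h; split_ifs <;> omega

theorem key (T : Int) (e : Char) (he : PySem.Chars.isdigit e = true) :
    decide (PySem.Int.toChars (if PySem.Int.mod T 11 = 0 then (0:Int) else 11 - PySem.Int.mod T 11) = [e])
    = decide (PySem.Int.mod (T + (PySem.Int.ofChars? [e]).getD 0) 11 = 0) := by
  have hmem := digit_enum e he
  fin_cases hmem <;>
    exact key_one T _ _ (by decide) (by decide)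
      (by intro c h1 h2; interval_cases c <;> decide)

theorem ab_eq (number : String) :
    validate_frequent_parking_number number = validate_frequent_parking_number_alt number := by
  unfold validate_frequent_parking_number validate_frequent_parking_number_alt
  simp only [PySem.Str.len_eq, PySem.Str.strIsdigit]
  rcases hcs : number.toList with _ | ⟨a, _ | ⟨b, _ | ⟨c, _ | ⟨d, _ | ⟨e, _ | ⟨f, rest⟩⟩⟩⟩⟩⟩
  · norm_num
  · norm_num
  · norm_num
  · norm_num
  · norm_num
  · -- the real case: five characters
    rw [show PySem.List.slice [a,b,c,d,e] none (some (-1)) = [a,b,c,d] from rfl,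
        show PySem.List.pyGetD [a,b,c,d,e] (-1) ' ' = e from rfl,
        show PySem.List.slice [a,b,c,d,e] none (some 4) = [a,b,c,d] from rfl,
        show PySem.List.pyGetD [a,b,c,d,e] 4 ' ' = e from rfl,
        show (([a,b,c,d,e] : List Char).length : Int) = 5 from by norm_num]
    rw [if_neg (show ¬ ((5:Int) ≠ 5) from by norm_num)]
    by_cases hall : PySem.Chars.strIsdigit [a,b,c,d,e] = true
    · have hd4 : PySem.Chars.strIsdigit [a,b,c,d] = true := by
        simp only [PySem.Chars.strIsdigit, List.all, Bool.and_eq_true, List.isEmpty] at hall ⊢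
        tauto
      have he1 : PySem.Chars.strIsdigit [e] = true := by
        simp only [PySem.Chars.strIsdigit, List.all, Bool.and_eq_true, List.isEmpty] at hall ⊢
        tauto
      have he : PySem.Chars.isdigit e = true := by
        simp only [PySem.Chars.strIsdigit, List.all, Bool.and_eq_true, List.isEmpty] at hall
        tauto
      rw [if_neg (show ¬ (¬ PySem.Chars.strIsdigit [a,b,c,d] = true ∨
            ¬ PySem.Chars.strIsdigit [e] = true) from by simp [hd4, he1]),
          if_neg (show ¬ ((5:Int) ≠ 5 ∨ ¬ PySem.Chars.strIsdigit [a,b,c,d,e] = true) from by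
            simp [hall])]
      rw [key _ e he]
      congr 1
      simp only [PySem.List.enumerate, List.foldl, List.map, List.sum_cons, List.sum_nil]
      ring_nf
    · rw [if_pos (show (5:Int) ≠ 5 ∨ ¬ PySem.Chars.strIsdigit [a,b,c,d,e] = true from
            Or.inr hall),
          if_pos (show ¬ PySem.Chars.strIsdigit [a,b,c,d] = true ∨
            ¬ PySem.Chars.strIsdigit [e] = true from by
            simp only [PySem.Chars.strIsdigit, List.all, Bool.and_eq_true, List.isEmpty] at hall ⊢
            tauto)]
  · -- six or more characters: the length guard fails on both sides
    have hl : (((a :: b :: c :: d :: e :: f :: rest).length : Nat) : Int) ≠ 5 := by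
      simp only [List.length_cons]; push_cast; omega
    rw [if_pos hl, if_pos (Or.inl hl)]

-- ===== VERDICT =====
theorem validate_frequent_parking_number_spec : Claim_equal_validate_frequent_parking_number := by
  intro number _
  unfold Spec_validate_frequent_parking_number
  exact ab_eq number
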